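-- pv_equiv track=rewrite | github.com/sunjae0902/backjoon | 프로그래머스/3/131129. 카운트 다운/카운트 다운.py | solution
-- ===== SOURCE A (Python) =====
-- from collections import deque
--
-- def solution(target):
--     scores = []
--
--     for i in range(1, 21):
--         scores.append((i, 1))   # single, Bull인 경우만 우선순위
--         scores.append((i * 2, 0))
--         scores.append((i * 3, 0))
--     scores.append((50, 1))
--
--     # BFS: (현재 점수, 던진 횟수, 싱글+불 횟수)
--     queue = deque()
--     queue.append((0, 0, 0))  # 시작점
--
--     # visited[score] = (최소 던진 횟수, 보너스 사용 횟수)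
--     visited = {}
--
--     while queue:
--         cur, count, bonus = queue.popleft()
--
--         if cur > target:
--             continue
--
--         # 이미 방문한 점수인 경우 → 더 적은 횟수로 방문했다면 갱신 안 함
--         if cur in visited:
--             prev_count, prev_bonus = visited[cur]
--             if count > prev_count:
--                 continue
--             if count == prev_count and bonus <= prev_bonus:
--                 continue
--
--         visited[cur] = (count, bonus)
--
--         # 다음 점수 탐색
--         for score, is_bonus in scores:
--             queue.append((cur + score, count + 1, bonus + is_bonus))
--
--     # 결과
--     min_count, max_bonus = visited[target]
--     return [min_count, max_bonus]
-- ===== SOURCE B (Python) =====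
-- def solution(target):
--     # min throws to reach target exactly, tie-broken by max single/bull count:
--     # bottom-up DP over scores 1..target instead of A's BFS over throw sequences.
--     # Only the last 60 dp values are ever needed (the largest move is 60), so a
--     # sliding window (most recent score first) replaces the whole dp table.
--     moves = ([(i, 1) for i in range(1, 21)]
--              + [(i * 2, 0) for i in range(1, 21)]
--              + [(i * 3, 0) for i in range(1, 21)]
--              + [(50, 1)])
--     window = [(0, 0)]  # window[k] = (min throws, max bonus) for score s - 1 - k
--     for s in range(1, target + 1):
--         c, b = window[0][0] + 1, window[0][1] + 1  # single 1 is always available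
--         for sc, bonus in moves:
--             if sc <= s:
--                 cc, bb = window[sc - 1][0] + 1, window[sc - 1][1] + bonus
--                 if cc < c or (cc == c and bb > b):
--                     c, b = cc, bb
--         window = [(c, b)] + window[:59]
--     return [window[0][0], window[0][1]]
-- ===== Notes on version B (the rewrite author's own statement) =====
-- stated objective: faster
-- what changed: Replaced A's BFS over individual throw sequences (deque of (score,throws,bonus) states with a visited dict and re-expansions) by a bottom-up DP over scores 1..target where dp[s] = (min throws, max single/bull count), computed once per score from the 61 moves.
import Mathlib
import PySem

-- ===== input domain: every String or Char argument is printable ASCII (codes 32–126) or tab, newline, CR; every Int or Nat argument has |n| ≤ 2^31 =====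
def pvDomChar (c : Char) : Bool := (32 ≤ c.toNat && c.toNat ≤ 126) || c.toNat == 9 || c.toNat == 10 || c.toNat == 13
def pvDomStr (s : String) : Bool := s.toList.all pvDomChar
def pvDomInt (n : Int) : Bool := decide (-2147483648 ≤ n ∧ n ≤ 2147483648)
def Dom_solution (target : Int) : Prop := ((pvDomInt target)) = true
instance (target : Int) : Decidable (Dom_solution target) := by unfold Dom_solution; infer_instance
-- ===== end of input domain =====

-- B replaces A's BFS over throw sequences by a bottom-up DP over scores 1..target (measured faster);
-- equal return value is proved for all target ≥ 0 (A raises KeyError on negative targets).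

-- ===== PORT A =====
-- the `scores` list built by A's first loop
def pvScoresA : List (Int × Int) :=
  ((PySem.List.pyRange 1 21 1).foldl (fun acc i => acc ++ [(i, 1), (i * 2, 0), (i * 3, 0)]) []) ++ [(50, 1)]

-- every score is ≥ 1 (used only for the loop invariant that justifies termination)
theorem pvScoresA_pos : ∀ m ∈ pvScoresA, 1 ≤ m.1 := by decide

-- the enqueued children keep the invariant 0 ≤ score ∧ count ≤ score (termination only)
theorem pvChild_inv (cur c b : Int) (h2 : 0 ≤ cur ∧ c ≤ cur) :
    ∀ e ∈ pvScoresA.map fun m => (cur + m.1, c + 1, b + m.2), 0 ≤ e.1 ∧ e.2.1 ≤ e.1 := by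
  intro e he
  rcases List.mem_map.mp he with ⟨m, hm, rfl⟩
  have h1 := pvScoresA_pos m hm
  obtain ⟨ha, hb⟩ := h2
  exact ⟨show 0 ≤ cur + m.1 by omega, show c + 1 ≤ cur + m.1 by omega⟩

-- termination measure for A's while-loop: each queue entry weighs 62^(target+2-count);
-- the queue is a two-list (front/back) persistent deque, so the measure also counts the back list
def pvPhi (target : Int) (q : List (Int × Int × Int)) : Nat :=
  (q.map fun e => 62 ^ (target + 2 - e.2.1).toNat).sum

theorem pvPhi_cons (target : Int) (e : Int × Int × Int) (q : List (Int × Int × Int)) :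
    pvPhi target (e :: q) = 62 ^ (target + 2 - e.2.1).toNat + pvPhi target q := by
  simp [pvPhi]

theorem pvPhi_append (target : Int) (a b : List (Int × Int × Int)) :
    pvPhi target (a ++ b) = pvPhi target a + pvPhi target b := by
  simp [pvPhi]

theorem pvPhi_reverse (target : Int) (a : List (Int × Int × Int)) :
    pvPhi target a.reverse = pvPhi target a := by
  unfold pvPhi
  rw [List.map_reverse]
  exact List.sum_reverse (a.map fun e => 62 ^ (target + 2 - e.2.1).toNat)

theorem pvPhi_tail_lt (target : Int) (e : Int × Int × Int) (q : List (Int × Int × Int)) :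
    pvPhi target q < pvPhi target (e :: q) := by
  rw [pvPhi_cons]
  have : 0 < 62 ^ (target + 2 - e.2.1).toNat := pow_pos (by norm_num : (0:Nat) < 62) _
  omega

theorem pvPhi_children (target cur c b : Int) :
    pvPhi target (pvScoresA.map fun m => (cur + m.1, c + 1, b + m.2)) =
      61 * 62 ^ (target + 1 - c).toNat := by
  unfold pvPhi
  rw [List.map_map]
  have : (pvScoresA.map ((fun e : Int × Int × Int => 62 ^ (target + 2 - e.2.1).toNat) ∘
      fun m : Int × Int => (cur + m.1, c + 1, b + m.2))) =
      List.replicate pvScoresA.length (62 ^ (target + 1 - c).toNat) := by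
    apply List.eq_replicate_of_mem
    intro x hx
    rcases List.mem_map.mp hx with ⟨m, _, rfl⟩
    simp only [Function.comp]
    congr 2
    omega
  rw [this, List.sum_replicate, smul_eq_mul]
  have hlen : pvScoresA.length = 61 := by decide
  rw [hlen]

theorem pvScoresA_len : pvScoresA.length = 61 := by decide

-- the combined deque measure strictly drops on every step of the loop
theorem pvM_expand_lt (target cur c b : Int) (f back : List (Int × Int × Int))
    (hc : c ≤ cur) (hcur : cur ≤ target) :
    2 * (pvPhi target f +
        pvPhi target ((pvScoresA.map fun m => (cur + m.1, c + 1, b + m.2)).reverse ++ back)) +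
      ((pvScoresA.map fun m => (cur + m.1, c + 1, b + m.2)).reverse ++ back).length <
    2 * (pvPhi target ((cur, c, b) :: f) + pvPhi target back) + back.length := by
  have hE : (target + 2 - c).toNat = (target + 1 - c).toNat + 1 := by omega
  rw [pvPhi_append, pvPhi_reverse, pvPhi_children, pvPhi_cons]
  have hpr : ((cur, c, b) : Int × Int × Int).2.1 = c := rfl
  rw [hpr]
  have h62 : 62 ^ (target + 2 - c).toNat = 62 * 62 ^ (target + 1 - c).toNat := by
    rw [hE, pow_succ]; ring
  rw [h62]
  have hX : 62 ≤ 62 ^ (target + 1 - c).toNat := by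
    have h1 : (target + 1 - c).toNat ≠ 0 := by omega
    exact Nat.le_self_pow h1 62
  simp only [List.length_append, List.length_reverse, List.length_map, pvScoresA_len]
  omega

-- A's BFS while-loop over the deque (front ++ back.reverse); the Prop argument hq
-- (0 ≤ score and count ≤ score for every queued entry) is a loop invariant carried
-- only to justify termination, it is erased at runtime.
def bfsLoop (target : Int) (front back : List (Int × Int × Int))
    (v : Std.HashMap Int (Int × Int))
    (hq : ∀ e ∈ front ++ back, 0 ≤ e.1 ∧ e.2.1 ≤ e.1) : Std.HashMap Int (Int × Int) :=
  match front, back, hq with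
  | [], [], _ => v
  | [], e :: bs, hq =>
    bfsLoop target ((e :: bs).reverse) [] v
      (by
        intro x hx
        apply hq
        simp at hx ⊢
        tauto)
  | (cur, c, b) :: f, back, hq =>
    if hcur : cur > target then
      bfsLoop target f back v (fun e he => hq e (List.mem_cons_of_mem _ he))
    else
      match v[cur]? with
      | some (pc, pb) =>
        if c > pc then
          bfsLoop target f back v (fun e he => hq e (List.mem_cons_of_mem _ he))
        else if c = pc ∧ b ≤ pb then
          bfsLoop target f back v (fun e he => hq e (List.mem_cons_of_mem _ he))
        else
          bfsLoop target f ((pvScoresA.map fun m => (cur + m.1, c + 1, b + m.2)).reverse ++ back)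
            (v.insert cur (c, b))
            (by
              intro e he
              rcases List.mem_append.mp he with h | h
              · exact hq e (List.mem_cons_of_mem _ (List.mem_append_left _ h))
              · rcases List.mem_append.mp h with h2 | h2
                · exact pvChild_inv cur c b (hq (cur, c, b) List.mem_cons_self) e
                    (List.mem_reverse.mp h2)
                · exact hq e (List.mem_cons_of_mem _ (List.mem_append_right _ h2)))
      | none =>
          bfsLoop target f ((pvScoresA.map fun m => (cur + m.1, c + 1, b + m.2)).reverse ++ back)
            (v.insert cur (c, b))
            (by
              intro e he
              rcases List.mem_append.mp he with h | h
              · exact hq e (List.mem_cons_of_mem _ (List.mem_append_left _ h))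
              · rcases List.mem_append.mp h with h2 | h2
                · exact pvChild_inv cur c b (hq (cur, c, b) List.mem_cons_self) e
                    (List.mem_reverse.mp h2)
                · exact hq e (List.mem_cons_of_mem _ (List.mem_append_right _ h2)))
  termination_by 2 * (pvPhi target front + pvPhi target back) + back.length
  decreasing_by
  all_goals first
    | (rw [pvPhi_reverse]
       simp only [List.length_nil, List.length_cons]
       omega)
    | (have := pvPhi_tail_lt target (cur, c, b) f
       omega)
    | (have h2 := hq (cur, c, b) List.mem_cons_self
       exact pvM_expand_lt target cur c b f back (by simp at h2; omega) (by omega))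

def solution (target : Int) : List Int :=
  match (bfsLoop target [(0, 0, 0)] [] (∅ : Std.HashMap Int (Int × Int))
      (by intro e he; simp at he; simp [he]))[target]? with
  | some p => [p.1, p.2]   -- `visited[target]` then `[min_count, max_bonus]`
  | none => []             -- Python raises KeyError here (excluded by Pre_)

-- ===== PORT B =====
def pvMovesB : List (Int × Int) :=
  ((PySem.List.pyRange 1 21 1).map fun i => (i, (1 : Int)))
    ++ ((PySem.List.pyRange 1 21 1).map fun i => (i * 2, (0 : Int)))
    ++ ((PySem.List.pyRange 1 21 1).map fun i => (i * 3, (0 : Int)))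
    ++ [(50, 1)]

-- candidate reached by move m from window[m.1 - 1]  (index provably in range whenever 1 ≤ m.1 ≤ s)
def pvWCand (w : List (Int × Int)) (m : Int × Int) : Int × Int :=
  ((PySem.List.pyGetD w (m.1 - 1) (0, 0)).1 + 1, (PySem.List.pyGetD w (m.1 - 1) (0, 0)).2 + m.2)

-- the inner `for sc, bonus in moves` body
def pvWStep (w : List (Int × Int)) (s : Int) (best : Int × Int) (m : Int × Int) : Int × Int :=
  if m.1 ≤ s then
    if (pvWCand w m).1 < best.1 ∨ ((pvWCand w m).1 = best.1 ∧ (pvWCand w m).2 > best.2) then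
      pvWCand w m
    else best
  else best

-- best (min throws, then max bonus) for score s, seeded with the always-available single 1
def pvWBest (w : List (Int × Int)) (s : Int) : Int × Int :=
  pvMovesB.foldl (pvWStep w s) (pvWCand w (1, 1))

def solution_alt (target : Int) : List Int :=
  let w := (PySem.List.pyRange 1 (target + 1) 1).foldl
    (fun w s => pvWBest w s :: PySem.List.slice w none (some 59)) [(0, 0)]
  match PySem.List.pyGet? w 0 with
  | some p => [p.1, p.2]
  | none => []             -- unreachable: the window is never empty

-- ===== PRECONDITION & SPEC =====
-- Pre_ excludes exactly the inputs where A raises: target < 0 (visited never gains the key, KeyError).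
def Pre_solution (target : Int) : Prop := 0 ≤ target
instance (target : Int) : Decidable (Pre_solution target) := by unfold Pre_solution; infer_instance
def pvWitness_solution : Int := (5)

def Spec_solution (target : Int) (out : List Int) : Prop := out = solution_alt target
instance (target : Int) (out : List Int) : Decidable (Spec_solution target out) := by
  unfold Spec_solution; infer_instance

-- ===== CLAIM (what is proved, stated in full; the proofs are below) =====
def Claim_equal_solution : Prop :=
  ∀ (target : Int), Dom_solution target → Pre_solution target → Spec_solution target (solution target)

-- ===== LEMMAS AND PROOFS =====

-- "a is at least as good as b": fewer throws, or equal throws and at least as many singles/bulls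
def pvLe (a b : Int × Int) : Prop := a.1 < b.1 ∨ (a.1 = b.1 ∧ b.2 ≤ a.2)

theorem pvLe_refl (a : Int × Int) : pvLe a a := by unfold pvLe; omega

theorem pvLe_trans {a b c : Int × Int} (h1 : pvLe a b) (h2 : pvLe b c) : pvLe a c := by
  unfold pvLe at *; omega

theorem pvLe_antisymm {a b : Int × Int} (h1 : pvLe a b) (h2 : pvLe b a) : a = b := by
  unfold pvLe at *
  have : a.1 = b.1 ∧ a.2 = b.2 := by omega
  exact Prod.ext this.1 this.2

theorem pvLe_add {a b : Int × Int} (β : Int) (h : pvLe a b) :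
    pvLe (a.1 + 1, a.2 + β) (b.1 + 1, b.2 + β) := by
  unfold pvLe at *; simp at *; omega


-- HashMap insert/lookup, phrased with a propositional if on the queried key
theorem hm_get_insert (m : Std.HashMap Int (Int × Int)) (k k' : Int) (v : Int × Int) :
    (m.insert k v)[k']? = if k' = k then some v else m[k']? := by
  rw [Std.HashMap.getElem?_insert]
  by_cases h : k' = k
  · simp [h]
  · simp [h, Ne.symm h]

theorem pvMemRequeue {α : Type} (f ch back : List α) {e : α} (h : e ∈ f ++ back) :
    e ∈ f ++ (ch ++ back) := by
  rcases List.mem_append.mp h with h | h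
  · exact List.mem_append_left _ h
  · exact List.mem_append_right _ (List.mem_append_right _ h)

-- proof-side full-table DP (the window port below is proved equal to it)
def pvCand (dp : List (Int × Int)) (s : Int) (m : Int × Int) : Int × Int :=
  ((PySem.List.pyGetD dp (s - m.1) (0, 0)).1 + 1, (PySem.List.pyGetD dp (s - m.1) (0, 0)).2 + m.2)

def pvStep (dp : List (Int × Int)) (s : Int) (best : Int × Int) (m : Int × Int) : Int × Int :=
  if m.1 ≤ s then
    if (pvCand dp s m).1 < best.1 ∨ ((pvCand dp s m).1 = best.1 ∧ (pvCand dp s m).2 > best.2) then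
      pvCand dp s m
    else best
  else best

def pvBest (dp : List (Int × Int)) (s : Int) : Int × Int :=
  pvMovesB.foldl (pvStep dp s) (pvCand dp s (1, 1))

-- proof-side mirror of B's dp list: dpAux n is dp after processing scores 1..n
def dpAux : Nat → List (Int × Int)
  | 0 => [(0, 0)]
  | n + 1 => dpAux n ++ [pvBest (dpAux n) ((n : Int) + 1)]

-- the optimal value for score n
def pvVal : Nat → Int × Int
  | 0 => (0, 0)
  | n + 1 => pvBest (dpAux n) ((n : Int) + 1)

theorem pvVal_succ (n : Nat) : pvVal (n + 1) = pvBest (dpAux n) ((n : Int) + 1) := rfl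

theorem dpAux_eq_map (n : Nat) : dpAux n = (List.range (n + 1)).map pvVal := by
  induction n with
  | zero => simp [dpAux, pvVal]
  | succ n ih =>
    rw [List.range_succ, List.map_append, List.map_singleton, pvVal_succ, ← ih]
    rfl

theorem dpAux_length (n : Nat) : (dpAux n).length = n + 1 := by
  rw [dpAux_eq_map]; simp

theorem dpAux_getElem (n k : Nat) (hk : k < (dpAux n).length) : (dpAux n)[k] = pvVal k := by
  have hk' : k < n + 1 := by rw [dpAux_length] at hk; omega
  rw [List.getElem_of_eq (dpAux_eq_map n)]
  simp

theorem dpAux_get (n : Nat) (i : Int) (h0 : 0 ≤ i) (h1 : i ≤ (n : Int)) :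
    PySem.List.pyGetD (dpAux n) i (0, 0) = pvVal i.toNat := by
  have hlen : i < ((dpAux n).length : Int) := by rw [dpAux_length]; omega
  rw [PySem.List.pyGetD_eq_getElem _ _ h0 hlen]
  exact dpAux_getElem n i.toNat (by rw [dpAux_length]; omega)

-- optimal value reached through predecessor k with bonus β
def candV (k : Nat) (β : Int) : Int × Int := ((pvVal k).1 + 1, (pvVal k).2 + β)

theorem pvStep_facts (dp : List (Int × Int)) (s : Int) (best m : Int × Int) :
    (pvStep dp s best m = best ∨ (m.1 ≤ s ∧ pvStep dp s best m = pvCand dp s m)) ∧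
      pvLe (pvStep dp s best m) best ∧ (m.1 ≤ s → pvLe (pvStep dp s best m) (pvCand dp s m)) := by
  unfold pvStep
  split_ifs with h1 h2
  · refine ⟨Or.inr ⟨h1, rfl⟩, ?_, fun _ => pvLe_refl _⟩
    unfold pvLe; omega
  · exact ⟨Or.inl rfl, pvLe_refl _, fun _ => by unfold pvLe; omega⟩
  · exact ⟨Or.inl rfl, pvLe_refl _, fun h => absurd h h1⟩

theorem foldBest_spec (dp : List (Int × Int)) (s : Int) (L : List (Int × Int)) :
    ∀ init : Int × Int,
      (L.foldl (pvStep dp s) init = init ∨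
        ∃ m ∈ L, m.1 ≤ s ∧ L.foldl (pvStep dp s) init = pvCand dp s m) ∧
      pvLe (L.foldl (pvStep dp s) init) init ∧
      ∀ m ∈ L, m.1 ≤ s → pvLe (L.foldl (pvStep dp s) init) (pvCand dp s m) := by
  induction L with
  | nil => intro init; exact ⟨Or.inl rfl, pvLe_refl _, by simp⟩
  | cons x L ih =>
    intro init
    have hx := pvStep_facts dp s init x
    have hih := ih (pvStep dp s init x)
    simp only [List.foldl_cons]
    refine ⟨?_, ?_, ?_⟩
    · rcases hih.1 with h | ⟨m, hm, hms, hme⟩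
      · rcases hx.1 with h2 | ⟨h2, h3⟩
        · exact Or.inl (h.trans h2)
        · exact Or.inr ⟨x, List.mem_cons_self, h2, h.trans h3⟩
      · exact Or.inr ⟨m, List.mem_cons_of_mem _ hm, hms, hme⟩
    · exact pvLe_trans hih.2.1 hx.2.1
    · intro m hm hms
      rcases List.mem_cons.mp hm with rfl | hm'
      · exact pvLe_trans hih.2.1 (hx.2.2 hms)
      · exact hih.2.2 m hm' hms

theorem pvMovesB_pos : ∀ m ∈ pvMovesB, 1 ≤ m.1 := by decide
theorem one_one_mem : ((1 : Int), (1 : Int)) ∈ pvMovesB := by decide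
theorem scoresA_sub_movesB : ∀ m ∈ pvScoresA, m ∈ pvMovesB := by decide
theorem movesB_sub_scoresA : ∀ m ∈ pvMovesB, m ∈ pvScoresA := by decide

theorem pvCand_eq_candV (n : Nat) (m : Int × Int) (h1 : 1 ≤ m.1) (h2 : m.1 ≤ (n : Int) + 1) :
    pvCand (dpAux n) ((n : Int) + 1) m = candV (((n : Int) + 1 - m.1).toNat) m.2 := by
  unfold pvCand candV
  rw [dpAux_get n ((n : Int) + 1 - m.1) (by omega) (by omega)]

theorem bellman_le (n : Nat) (m : Int × Int) (hm : m ∈ pvMovesB) (h : m.1 ≤ (n : Int) + 1) :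
    pvLe (pvVal (n + 1)) (candV (((n : Int) + 1 - m.1).toNat) m.2) := by
  have h1 := pvMovesB_pos m hm
  rw [← pvCand_eq_candV n m h1 h]
  have := (foldBest_spec (dpAux n) ((n : Int) + 1) pvMovesB (pvCand (dpAux n) ((n : Int) + 1) (1, 1))).2.2 m hm h
  exact this

theorem bellman_attain (n : Nat) :
    ∃ m ∈ pvMovesB, 1 ≤ m.1 ∧ m.1 ≤ (n : Int) + 1 ∧
      pvVal (n + 1) = candV (((n : Int) + 1 - m.1).toNat) m.2 := by
  have hspec := (foldBest_spec (dpAux n) ((n : Int) + 1) pvMovesB (pvCand (dpAux n) ((n : Int) + 1) (1, 1))).1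
  rcases hspec with h | ⟨m, hm, hms, hme⟩
  · refine ⟨(1, 1), one_one_mem, by norm_num, show (1:Int) ≤ (n : Int) + 1 by omega, ?_⟩
    show pvBest (dpAux n) ((n : Int) + 1) = _
    unfold pvBest
    rw [h, pvCand_eq_candV n (1, 1) (by norm_num) (show (1:Int) ≤ (n : Int) + 1 by omega)]
  · have h1 := pvMovesB_pos m hm
    refine ⟨m, hm, h1, hms, ?_⟩
    show pvBest (dpAux n) ((n : Int) + 1) = _
    unfold pvBest
    rw [hme, pvCand_eq_candV n m h1 hms]


-- ===== the window port equals the full-table DP =====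
theorem pvMovesB_le60 : ∀ m ∈ pvMovesB, m.1 ≤ 60 := by decide

-- the window after processing scores 1..n: most recent 60 dp values, newest first
def wAux (n : Nat) : List (Int × Int) := (dpAux n).reverse.take 60

theorem wAux_length (n : Nat) : (wAux n).length = min 60 (n + 1) := by
  simp [wAux, dpAux_length]

theorem wAux_head (n : Nat) :
    wAux n = pvVal n :: ((List.range n).map pvVal).reverse.take 59 := by
  unfold wAux
  rw [dpAux_eq_map, List.range_succ, List.map_append, List.reverse_append]
  simp [List.take_succ_cons]

theorem wAux_get (n : Nat) (i : Int) (h0 : 0 ≤ i) (hn : i ≤ (n : Int)) (h60 : i < 60) :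
    PySem.List.pyGetD (wAux n) i (0, 0) = pvVal (n - i.toNat) := by
  have hlen : i < ((wAux n).length : Int) := by rw [wAux_length]; push_cast; omega
  rw [PySem.List.pyGetD_eq_getElem _ _ h0 hlen]
  have hi : i.toNat < (wAux n).length := by omega
  have h1 : i.toNat < ((dpAux n).reverse.length) := by
    simp [dpAux_length]; omega
  have h2 : (wAux n)[i.toNat]'hi = (dpAux n).reverse[i.toNat]'h1 := by
    unfold wAux
    exact List.getElem_take
  rw [h2, List.getElem_reverse]
  rw [dpAux_getElem]
  congr 1
  rw [dpAux_length]
  omega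

theorem pvWCand_eq (n : Nat) (m : Int × Int) (hm : m ∈ pvMovesB) (h2 : m.1 ≤ (n : Int) + 1) :
    pvWCand (wAux n) m = pvCand (dpAux n) ((n : Int) + 1) m := by
  have h1 : 1 ≤ m.1 := pvMovesB_pos m hm
  have h60 : m.1 ≤ 60 := pvMovesB_le60 m hm
  unfold pvWCand pvCand
  rw [wAux_get n (m.1 - 1) (by omega) (by omega) (by omega)]
  rw [dpAux_get n ((n : Int) + 1 - m.1) (by omega) (by omega)]
  have : n - (m.1 - 1).toNat = ((n : Int) + 1 - m.1).toNat := by omega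
  rw [this]

theorem pvWBest_eq (n : Nat) : pvWBest (wAux n) ((n : Int) + 1) = pvBest (dpAux n) ((n : Int) + 1) := by
  unfold pvWBest pvBest
  rw [pvWCand_eq n (1, 1) one_one_mem (by omega)]
  apply PySem.List.foldl_congr_mem
  intro acc m hm
  unfold pvWStep pvStep
  by_cases hg : m.1 ≤ (n : Int) + 1
  · rw [if_pos hg, if_pos hg, pvWCand_eq n m hm hg]
  · rw [if_neg hg, if_neg hg]

-- B's port fold computes the window
theorem w_fold_eq (n : Nat) :
    (PySem.List.pyRange 1 ((n : Int) + 1) 1).foldl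
        (fun w s => pvWBest w s :: PySem.List.slice w none (some 59)) [((0 : Int), (0 : Int))] =
      wAux n := by
  induction n with
  | zero => simp [PySem.List.pyRange_one_eq_nil, wAux, dpAux]
  | succ n ih =>
    have h1 : (((n + 1 : Nat) : Int) + 1) = ((n : Int) + 1) + 1 := by push_cast; ring
    rw [h1, PySem.List.pyRange_one_succ_right (by omega), List.foldl_append, ih]
    simp only [List.foldl_cons, List.foldl_nil]
    rw [PySem.List.slice_to _ (by norm_num)]
    have hbest : pvWBest (wAux n) ((n : Int) + 1) = pvVal (n + 1) := by
      rw [pvWBest_eq]; rfl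
    rw [hbest]
    unfold wAux
    rw [dpAux, List.reverse_append]
    have hrev : ([pvBest (dpAux n) ((n : Int) + 1)].reverse) = [pvVal (n + 1)] := rfl
    rw [hrev]
    simp only [List.singleton_append, List.take_succ_cons]
    rw [show ((59 : Int)).toNat = 59 from rfl, List.take_take]
    norm_num

theorem solution_alt_eq (target : Int) (ht : 0 ≤ target) :
    solution_alt target = [(pvVal target.toNat).1, (pvVal target.toNat).2] := by
  unfold solution_alt
  have hcast : target + 1 = (target.toNat : Int) + 1 := by omega
  rw [hcast, w_fold_eq target.toNat]
  show (match PySem.List.pyGet? (wAux target.toNat) 0 with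
    | some p => [p.1, p.2] | none => ([] : List Int)) = _
  rw [wAux_head, PySem.List.pyGet?_zero_cons]

-- ===== equation lemmas for bfsLoop (proof irrelevance lets us state them for any hq) =====
theorem bfsLoop_empty (target : Int) (v : Std.HashMap Int (Int × Int)) (hq) :
    bfsLoop target [] [] v hq = v := by
  rw [bfsLoop.eq_def]

theorem bfsLoop_rotate (target : Int) (e : Int × Int × Int) (bs : List (Int × Int × Int))
    (v : Std.HashMap Int (Int × Int)) (hq hq') :
    bfsLoop target [] (e :: bs) v hq = bfsLoop target ((e :: bs).reverse) [] v hq' := by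
  rw [bfsLoop.eq_def]

theorem bfsLoop_drop (target cur c b : Int) (f back : List (Int × Int × Int))
    (v : Std.HashMap Int (Int × Int)) (hq hq') (h : cur > target) :
    bfsLoop target ((cur, c, b) :: f) back v hq = bfsLoop target f back v hq' := by
  rw [bfsLoop.eq_def]
  simp only [dif_pos h]

theorem bfsLoop_prune (target cur c b : Int) (f back : List (Int × Int × Int))
    (v : Std.HashMap Int (Int × Int)) (hq hq') (hcur : ¬ cur > target) (pc pb : Int)
    (hv : v[cur]? = some (pc, pb)) (hp : c > pc ∨ (c = pc ∧ b ≤ pb)) :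
    bfsLoop target ((cur, c, b) :: f) back v hq = bfsLoop target f back v hq' := by
  rw [bfsLoop.eq_def]
  simp only [dif_neg hcur, hv]
  rcases hp with h | h
  · rw [if_pos h]
  · rw [if_neg (by omega), if_pos h]

theorem bfsLoop_expand_none (target cur c b : Int) (f back : List (Int × Int × Int))
    (v : Std.HashMap Int (Int × Int)) (hq hq') (hcur : ¬ cur > target)
    (hv : v[cur]? = none) :
    bfsLoop target ((cur, c, b) :: f) back v hq =
      bfsLoop target f ((pvScoresA.map fun m => (cur + m.1, c + 1, b + m.2)).reverse ++ back)
        (v.insert cur (c, b)) hq' := by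
  rw [bfsLoop.eq_def]
  simp only [dif_neg hcur, hv]

theorem bfsLoop_expand_some (target cur c b : Int) (f back : List (Int × Int × Int))
    (v : Std.HashMap Int (Int × Int)) (hq hq') (hcur : ¬ cur > target) (pc pb : Int)
    (hv : v[cur]? = some (pc, pb)) (h1 : ¬ c > pc) (h2 : ¬ (c = pc ∧ b ≤ pb)) :
    bfsLoop target ((cur, c, b) :: f) back v hq =
      bfsLoop target f ((pvScoresA.map fun m => (cur + m.1, c + 1, b + m.2)).reverse ++ back)
        (v.insert cur (c, b)) hq' := by
  rw [bfsLoop.eq_def]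
  simp only [dif_neg hcur, hv, if_neg h1, if_neg h2]

-- the Bellman inequality transported to a child score cur + m.1
theorem child_le (cur c b : Int) (m : Int × Int) (hm : m ∈ pvScoresA) (h0 : 0 ≤ cur)
    (hcb : pvLe (pvVal cur.toNat) (c, b)) :
    pvLe (pvVal (cur + m.1).toNat) (c + 1, b + m.2) := by
  have hm1 : 1 ≤ m.1 := pvScoresA_pos m hm
  set K := (cur + m.1).toNat with hK
  have hKint : (K : Int) = cur + m.1 := Int.toNat_of_nonneg (by omega)
  have hK1 : 1 ≤ K := by omega
  have hsucc : K - 1 + 1 = K := by omega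
  have hle : m.1 ≤ ((K - 1 : Nat) : Int) + 1 := by omega
  have hbell := bellman_le (K - 1) m (scoresA_sub_movesB m hm) hle
  rw [hsucc] at hbell
  have hidx : (((K - 1 : Nat) : Int) + 1 - m.1) = cur := by omega
  rw [hidx] at hbell
  refine pvLe_trans hbell ?_
  unfold candV
  exact pvLe_add m.2 hcb

-- ===== the BFS master lemma =====
theorem bfs_master (target : Int) (ht : 0 ≤ target) :
    ∀ (N : Nat) (front back : List (Int × Int × Int)) (v : Std.HashMap Int (Int × Int))
      (hq : ∀ e ∈ front ++ back, 0 ≤ e.1 ∧ e.2.1 ≤ e.1),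
      2 * (pvPhi target front + pvPhi target back) + back.length ≤ N →
      (∀ e ∈ front ++ back, e.1 ≤ target → pvLe (pvVal e.1.toNat) (e.2.1, e.2.2)) →
      (∀ k p, v[k]? = some p → 0 ≤ k ∧ k ≤ target ∧ pvLe (pvVal k.toNat) p) →
      (∀ k p, v[k]? = some p → ∀ m ∈ pvScoresA, k + m.1 ≤ target →
          (∃ p', v[k + m.1]? = some p' ∧ pvLe p' (p.1 + 1, p.2 + m.2)) ∨
          (∃ e ∈ front ++ back, e.1 = k + m.1 ∧ pvLe (e.2.1, e.2.2) (p.1 + 1, p.2 + m.2))) →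
      ((∃ p, v[(0 : Int)]? = some p ∧ pvLe p ((0 : Int), (0 : Int))) ∨
        (∃ e ∈ front ++ back, e.1 = 0 ∧ pvLe (e.2.1, e.2.2) ((0 : Int), (0 : Int)))) →
      (∀ k p, (bfsLoop target front back v hq)[k]? = some p →
          0 ≤ k ∧ k ≤ target ∧ pvLe (pvVal k.toNat) p) ∧
      (∀ k p, (bfsLoop target front back v hq)[k]? = some p → ∀ m ∈ pvScoresA, k + m.1 ≤ target →
          ∃ p', (bfsLoop target front back v hq)[k + m.1]? = some p' ∧ pvLe p' (p.1 + 1, p.2 + m.2)) ∧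
      (∃ p, (bfsLoop target front back v hq)[(0 : Int)]? = some p ∧ pvLe p ((0 : Int), (0 : Int))) := by
  intro N
  induction N with
  | zero =>
    intro front back v hq hPhi ha hb hc hd
    cases front with
    | cons e f =>
      exfalso
      have h1 := pvPhi_tail_lt target e f
      omega
    | nil =>
      cases back with
      | cons e bs =>
        exfalso
        have hl : (e :: bs).length = bs.length + 1 := rfl
        omega
      | nil =>
        rw [bfsLoop_empty]
        refine ⟨hb, ?_, ?_⟩
        · intro k p hk m hm hkm
          rcases hc k p hk m hm hkm with ⟨p', hp', hle⟩ | ⟨e', he', _⟩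
          · exact ⟨p', hp', hle⟩
          · simp at he'
        · rcases hd with ⟨p, hp, hle⟩ | ⟨e', he', _⟩
          · exact ⟨p, hp, hle⟩
          · simp at he'
  | succ N ihN =>
    intro front back v hq hPhi ha hb hc hd
    cases front with
    | nil =>
      cases back with
      | nil =>
        rw [bfsLoop_empty]
        refine ⟨hb, ?_, ?_⟩
        · intro k p hk m hm hkm
          rcases hc k p hk m hm hkm with ⟨p', hp', hle⟩ | ⟨e', he', _⟩
          · exact ⟨p', hp', hle⟩
          · simp at he'
        · rcases hd with ⟨p, hp, hle⟩ | ⟨e', he', _⟩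
          · exact ⟨p, hp, hle⟩
          · simp at he'
      | cons e bs =>
        rw [bfsLoop_rotate target e bs v hq
          (by intro x hx; apply hq; simp at hx ⊢; tauto)]
        apply ihN ((e :: bs).reverse) [] v
          (by intro x hx; apply hq; simp at hx ⊢; tauto)
        · rw [pvPhi_reverse]
          have hl : (e :: bs).length = bs.length + 1 := rfl
          have hnil : pvPhi target ([] : List (Int × Int × Int)) = 0 := rfl
          simp only [hnil, List.length_nil]
          omega
        · intro x hx hxle
          refine ha x ?_ hxle
          simp at hx ⊢
          tauto
        · exact hb
        · intro k p hk m hm hkm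
          rcases hc k p hk m hm hkm with h | ⟨e', he', h1, h2⟩
          · exact Or.inl h
          · refine Or.inr ⟨e', ?_, h1, h2⟩
            simp at he' ⊢
            tauto
        · rcases hd with h | ⟨e', he', h1, h2⟩
          · exact Or.inl h
          · refine Or.inr ⟨e', ?_, h1, h2⟩
            simp at he' ⊢
            tauto
    | cons e f =>
      obtain ⟨cur, c, b⟩ := e
      have hqr : ∀ e ∈ f ++ back, 0 ≤ e.1 ∧ e.2.1 ≤ e.1 :=
        fun e he => hq e (List.mem_cons_of_mem _ he)
      have hMr : 2 * (pvPhi target f + pvPhi target back) + back.length ≤ N := by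
        have := pvPhi_tail_lt target (cur, c, b) f
        omega
      by_cases hcur : cur > target
      · -- dropped: cur > target contributes nothing below target
        rw [bfsLoop_drop target cur c b f back v hq hqr hcur]
        apply ihN f back v hqr hMr
        · exact fun e he h => ha e (List.mem_cons_of_mem _ he) h
        · exact hb
        · intro k p hk m hm hkm
          rcases hc k p hk m hm hkm with ⟨p', hp', hle⟩ | ⟨e', he', h1, h2⟩
          · exact Or.inl ⟨p', hp', hle⟩
          · rcases List.mem_cons.mp he' with rfl | hr
            · exfalso
              have : cur = k + m.1 := h1
              omega
            · exact Or.inr ⟨e', hr, h1, h2⟩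
        · rcases hd with ⟨p, hp, hle⟩ | ⟨e', he', h1, h2⟩
          · exact Or.inl ⟨p, hp, hle⟩
          · rcases List.mem_cons.mp he' with rfl | hr
            · exfalso
              have : cur = 0 := h1
              omega
            · exact Or.inr ⟨e', hr, h1, h2⟩
      · -- cur ≤ target
        have hcurle : cur ≤ target := by omega
        have hhead := hq (cur, c, b) List.mem_cons_self
        have h0cur : 0 ≤ cur := hhead.1
        have hccur : c ≤ cur := hhead.2
        have hcb : pvLe (pvVal cur.toNat) (c, b) :=
          ha (cur, c, b) List.mem_cons_self hcurle
        -- shared processing of the two expand branches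
        have expand :
            ∀ (hrepl : ∀ pc pb, v[cur]? = some (pc, pb) → pvLe (c, b) (pc, pb)),
            (∀ k p, (bfsLoop target
                f ((pvScoresA.map fun m => (cur + m.1, c + 1, b + m.2)).reverse ++ back)
                (v.insert cur (c, b))
                (by
                  intro e he
                  rcases List.mem_append.mp he with h | h
                  · exact hqr e (List.mem_append_left _ h)
                  · rcases List.mem_append.mp h with h2 | h2
                    · exact pvChild_inv cur c b hhead e (List.mem_reverse.mp h2)
                    · exact hqr e (List.mem_append_right _ h2)))[k]? = some p →
                0 ≤ k ∧ k ≤ target ∧ pvLe (pvVal k.toNat) p) ∧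
            (∀ k p, (bfsLoop target
                f ((pvScoresA.map fun m => (cur + m.1, c + 1, b + m.2)).reverse ++ back)
                (v.insert cur (c, b)) (by
                  intro e he
                  rcases List.mem_append.mp he with h | h
                  · exact hqr e (List.mem_append_left _ h)
                  · rcases List.mem_append.mp h with h2 | h2
                    · exact pvChild_inv cur c b hhead e (List.mem_reverse.mp h2)
                    · exact hqr e (List.mem_append_right _ h2)))[k]? = some p →
                ∀ m ∈ pvScoresA, k + m.1 ≤ target →
                ∃ p', (bfsLoop target
                    f ((pvScoresA.map fun m => (cur + m.1, c + 1, b + m.2)).reverse ++ back)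
                    (v.insert cur (c, b)) (by
                      intro e he
                      rcases List.mem_append.mp he with h | h
                      · exact hqr e (List.mem_append_left _ h)
                      · rcases List.mem_append.mp h with h2 | h2
                        · exact pvChild_inv cur c b hhead e (List.mem_reverse.mp h2)
                        · exact hqr e (List.mem_append_right _ h2)))[(k + m.1)]? = some p' ∧
                  pvLe p' (p.1 + 1, p.2 + m.2)) ∧
            (∃ p, (bfsLoop target
                f ((pvScoresA.map fun m => (cur + m.1, c + 1, b + m.2)).reverse ++ back)
                (v.insert cur (c, b)) (by
                  intro e he
                  rcases List.mem_append.mp he with h | h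
                  · exact hqr e (List.mem_append_left _ h)
                  · rcases List.mem_append.mp h with h2 | h2
                    · exact pvChild_inv cur c b hhead e (List.mem_reverse.mp h2)
                    · exact hqr e (List.mem_append_right _ h2)))[(0 : Int)]? = some p ∧
              pvLe p ((0 : Int), (0 : Int))) := by
          intro hrepl
          apply ihN
          · -- Phi decreases
            have := pvM_expand_lt target cur c b f back hccur hcurle
            omega
          · -- ha'
            intro e he hle
            rcases List.mem_append.mp he with h | h
            · exact ha e (List.mem_cons_of_mem _ (List.mem_append_left _ h)) hle
            · rcases List.mem_append.mp h with h2 | h2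
              · rcases List.mem_map.mp (List.mem_reverse.mp h2) with ⟨m, hm, rfl⟩
                exact child_le cur c b m hm h0cur hcb
              · exact ha e (List.mem_cons_of_mem _ (List.mem_append_right _ h2)) hle
          · -- hb'
            intro k p hk
            rw [hm_get_insert] at hk
            by_cases hkc : k = cur
            · rw [if_pos hkc] at hk
              cases hk
              subst hkc
              exact ⟨h0cur, hcurle, hcb⟩
            · rw [if_neg hkc] at hk
              exact hb k p hk
          · -- hc'
            intro k p hk m hm hkm
            rw [hm_get_insert] at hk
            by_cases hkc : k = cur
            · rw [if_pos hkc] at hk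
              cases hk
              subst hkc
              refine Or.inr ⟨(k + m.1, c + 1, b + m.2), ?_, rfl, pvLe_refl _⟩
              exact List.mem_append_right _ (List.mem_append_left _
                (List.mem_reverse.mpr (List.mem_map.mpr ⟨m, hm, rfl⟩)))
            · rw [if_neg hkc] at hk
              rcases hc k p hk m hm hkm with ⟨p', hp', hle⟩ | ⟨e', he', h1, h2⟩
              · by_cases hsc : k + m.1 = cur
                · refine Or.inl ⟨(c, b), ?_, ?_⟩
                  · rw [hm_get_insert, if_pos hsc]
                  · rw [hsc] at hp'
                    exact pvLe_trans (hrepl p'.1 p'.2 (by rw [hp'])) hle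
                · exact Or.inl ⟨p', by rw [hm_get_insert, if_neg hsc]; exact hp', hle⟩
              · rcases List.mem_cons.mp he' with rfl | hr
                · refine Or.inl ⟨(c, b), ?_, h2⟩
                  have hsc : k + m.1 = cur := h1.symm
                  rw [hm_get_insert, if_pos hsc]
                · exact Or.inr ⟨e', pvMemRequeue _ _ _ hr, h1, h2⟩
          · -- hd'
            rcases hd with ⟨p, hp, hle⟩ | ⟨e', he', h1, h2⟩
            · by_cases h0 : (0 : Int) = cur
              · refine Or.inl ⟨(c, b), ?_, ?_⟩
                · rw [hm_get_insert, if_pos h0]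
                · exact pvLe_trans (hrepl p.1 p.2 (by rw [← h0, hp])) hle
              · exact Or.inl ⟨p, by rw [hm_get_insert, if_neg h0]; exact hp, hle⟩
            · rcases List.mem_cons.mp he' with rfl | hr
              · refine Or.inl ⟨(c, b), ?_, h2⟩
                have h0 : (0 : Int) = cur := h1.symm
                rw [hm_get_insert, if_pos h0]
              · exact Or.inr ⟨e', pvMemRequeue _ _ _ hr, h1, h2⟩
        -- now the three inner branches of A's loop body
        cases hv : v[cur]? with
        | none =>
          rw [bfsLoop_expand_none target cur c b f back v hq
            (by
              intro e he
              rcases List.mem_append.mp he with h | h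
              · exact hqr e (List.mem_append_left _ h)
              · rcases List.mem_append.mp h with h2 | h2
                · exact pvChild_inv cur c b hhead e (List.mem_reverse.mp h2)
                · exact hqr e (List.mem_append_right _ h2)) hcur hv]
          exact expand (fun pc pb h => by rw [hv] at h; cases h)
        | some pp =>
          obtain ⟨pc, pb⟩ := pp
          by_cases h1 : c > pc
          · -- pruned: a strictly better visit of cur exists
            rw [bfsLoop_prune target cur c b f back v hq hqr hcur pc pb hv (Or.inl h1)]
            apply ihN f back v hqr hMr
            · exact fun e he h => ha e (List.mem_cons_of_mem _ he) h
            · exact hb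
            · intro k p hk m hm hkm
              rcases hc k p hk m hm hkm with ⟨p', hp', hle⟩ | ⟨e', he', hh1, hh2⟩
              · exact Or.inl ⟨p', hp', hle⟩
              · rcases List.mem_cons.mp he' with rfl | hr
                · refine Or.inl ⟨(pc, pb), ?_, ?_⟩
                  · have : cur = k + m.1 := hh1
                    rw [← this]
                    exact hv
                  · refine pvLe_trans ?_ hh2
                    exact show pc < c ∨ (pc = c ∧ b ≤ pb) by omega
                · exact Or.inr ⟨e', hr, hh1, hh2⟩
            · rcases hd with ⟨p, hp, hle⟩ | ⟨e', he', hh1, hh2⟩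
              · exact Or.inl ⟨p, hp, hle⟩
              · rcases List.mem_cons.mp he' with rfl | hr
                · refine Or.inl ⟨(pc, pb), ?_, ?_⟩
                  · have : cur = 0 := hh1
                    rw [← this]
                    exact hv
                  · refine pvLe_trans ?_ hh2
                    exact show pc < c ∨ (pc = c ∧ b ≤ pb) by omega
                · exact Or.inr ⟨e', hr, hh1, hh2⟩
          · by_cases h2 : c = pc ∧ b ≤ pb
            · -- pruned: an equally good visit of cur exists
              rw [bfsLoop_prune target cur c b f back v hq hqr hcur pc pb hv (Or.inr h2)]
              apply ihN f back v hqr hMr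
              · exact fun e he h => ha e (List.mem_cons_of_mem _ he) h
              · exact hb
              · intro k p hk m hm hkm
                rcases hc k p hk m hm hkm with ⟨p', hp', hle⟩ | ⟨e', he', hh1, hh2⟩
                · exact Or.inl ⟨p', hp', hle⟩
                · rcases List.mem_cons.mp he' with rfl | hr
                  · refine Or.inl ⟨(pc, pb), ?_, ?_⟩
                    · have : cur = k + m.1 := hh1
                      rw [← this]
                      exact hv
                    · refine pvLe_trans ?_ hh2
                      exact show pc < c ∨ (pc = c ∧ b ≤ pb) by omega
                  · exact Or.inr ⟨e', hr, hh1, hh2⟩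
              · rcases hd with ⟨p, hp, hle⟩ | ⟨e', he', hh1, hh2⟩
                · exact Or.inl ⟨p, hp, hle⟩
                · rcases List.mem_cons.mp he' with rfl | hr
                  · refine Or.inl ⟨(pc, pb), ?_, ?_⟩
                    · have : cur = 0 := hh1
                      rw [← this]
                      exact hv
                    · refine pvLe_trans ?_ hh2
                      exact show pc < c ∨ (pc = c ∧ b ≤ pb) by omega
                  · exact Or.inr ⟨e', hr, hh1, hh2⟩
            · -- accepted: (c, b) improves on (pc, pb)
              rw [bfsLoop_expand_some target cur c b f back v hq
                (by
                  intro e he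
                  rcases List.mem_append.mp he with h | h
                  · exact hqr e (List.mem_append_left _ h)
                  · rcases List.mem_append.mp h with h2 | h2
                    · exact pvChild_inv cur c b hhead e (List.mem_reverse.mp h2)
                    · exact hqr e (List.mem_append_right _ h2)) hcur pc pb hv h1 h2]
              apply expand
              intro pc' pb' h
              rw [hv] at h
              cases h
              exact show c < pc ∨ (c = pc ∧ pb ≤ b) by omega

theorem bfs_final (target : Int) (ht : 0 ≤ target) :
    ∀ n : Nat, (n : Int) ≤ target →
      (bfsLoop target [(0, 0, 0)] [] (∅ : Std.HashMap Int (Int × Int))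
        (by intro e he; simp at he; simp [he]))[(n : Int)]? = some (pvVal n) := by
  have hmaster := bfs_master target ht
    (2 * (pvPhi target [(0, 0, 0)] + pvPhi target []) + ([] : List (Int × Int × Int)).length)
    [(0, 0, 0)] [] (∅ : Std.HashMap Int (Int × Int))
    (by intro e he; simp at he; simp [he]) le_rfl
    (by
      intro e he hle
      simp at he
      subst he
      exact pvLe_refl _)
    (by intro k p hk; rw [Std.HashMap.getElem?_empty] at hk; cases hk)
    (by intro k p hk; rw [Std.HashMap.getElem?_empty] at hk; cases hk)
    (Or.inr ⟨(0, 0, 0), by simp, rfl, pvLe_refl _⟩)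
  obtain ⟨HB, HC, HD⟩ := hmaster
  intro n
  induction n using Nat.strong_induction_on with
  | _ n ih =>
    intro hn
    match n with
    | 0 =>
      obtain ⟨p, hp, hple⟩ := HD
      have h2 := (HB 0 p hp).2.2
      have hv0 : pvVal ((0 : Int)).toNat = ((0 : Int), (0 : Int)) := rfl
      rw [hv0] at h2
      rw [show ((0 : Nat) : Int) = (0 : Int) from rfl, hp, ← pvLe_antisymm h2 hple]
      rfl
    | k + 1 =>
      obtain ⟨m, hm, hm1, hmle, heq⟩ := bellman_attain k
      set j : Nat := (((k : Int) + 1) - m.1).toNat with hj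
      have hjint : (j : Int) = (k : Int) + 1 - m.1 := Int.toNat_of_nonneg (by omega)
      have hjk : j < k + 1 := by omega
      have hw : (bfsLoop target [(0, 0, 0)] [] (∅ : Std.HashMap Int (Int × Int))
          (by intro e he; simp at he; simp [he]))[(j : Int)]? = some (pvVal j) :=
        ih j hjk (by push_cast at hn ⊢; omega)
      obtain ⟨p', hp', hple⟩ :=
        HC (j : Int) (pvVal j) hw m (movesB_sub_scoresA m hm) (by push_cast at hn ⊢; omega)
      have hsum : (j : Int) + m.1 = ((k + 1 : Nat) : Int) := by push_cast; omega
      rw [hsum] at hp'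
      have h2 := (HB _ p' hp').2.2
      have htn : (((k + 1 : Nat) : Int)).toNat = k + 1 := by omega
      rw [htn] at h2
      have hple' : pvLe p' (pvVal (k + 1)) := by
        rw [heq]
        exact hple
      rw [hp', ← pvLe_antisymm h2 hple']

theorem solution_eq (target : Int) (ht : 0 ≤ target) :
    solution target = [(pvVal target.toNat).1, (pvVal target.toNat).2] := by
  unfold solution
  have h := bfs_final target ht target.toNat (by omega)
  have hc : ((target.toNat : Nat) : Int) = target := by omega
  rw [hc] at h
  rw [h]

-- ===== VERDICT (by name: the statement is the Claim_ definition above) =====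
theorem solution_spec : Claim_equal_solution := by
  intro target _ hpre
  unfold Spec_solution
  rw [solution_eq target hpre, solution_alt_eq target hpre]
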